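-- pv_equiv track=rewrite | github.com/j-suyako/Preprocess | lib/simple3D.py | _preprocess_ridge
-- ===== SOURCE A (Python) =====
-- def _preprocess_ridge(ridge):
--     map = dict()
--     for i, r in enumerate(ridge):
--         map.setdefault(r[0], i)
--     i = 0
--     process_ridge = [ridge[i]]
--     while ridge[i][1] != ridge[0][0]:
--         i = map[ridge[i][1]]
--         process_ridge.append(ridge[i])
--     return process_ridge
-- ===== SOURCE B (Python) =====
-- def _preprocess_ridge(ridge):
--     # Consume edges from a shrinking pool: pop the first remaining edge whose head
--     # matches the current tail; no index dict, the pool shrinking bounds the work.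
--     start = ridge[0][0]
--     out = [ridge[0]]
--     pool = ridge[1:]
--     while out[-1][1] != start:
--         t = out[-1][1]
--         j = next(k for k, r in enumerate(pool) if r[0] == t)
--         out.append(pool.pop(j))
--     return out
-- ===== Notes on version B (the rewrite author's own statement) =====
-- stated objective: alternative
-- what changed: B drops A's precomputed head->index dict and index chasing entirely: it keeps a shrinking pool of unused edges (initially ridge[1:]) and each step pops the first pool edge whose head equals the current tail, so consumed edges leave the search space and the traversal state is edges, not indices; correct because on any input where A terminates the queried heads are pairwise distinct (a repeated head would make A loop forever), so the first match in the shrinking pool is always the first match in the full list.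
import Mathlib
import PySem

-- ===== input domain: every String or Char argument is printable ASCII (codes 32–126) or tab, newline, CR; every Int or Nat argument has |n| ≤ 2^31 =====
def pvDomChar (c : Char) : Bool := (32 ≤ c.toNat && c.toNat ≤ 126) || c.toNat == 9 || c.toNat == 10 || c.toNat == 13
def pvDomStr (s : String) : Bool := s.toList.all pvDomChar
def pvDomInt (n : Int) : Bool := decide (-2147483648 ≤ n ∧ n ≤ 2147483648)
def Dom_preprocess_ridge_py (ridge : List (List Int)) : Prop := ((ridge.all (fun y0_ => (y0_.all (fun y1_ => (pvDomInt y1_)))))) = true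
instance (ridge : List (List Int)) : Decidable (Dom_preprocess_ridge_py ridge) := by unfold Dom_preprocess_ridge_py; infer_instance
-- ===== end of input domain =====

-- B replaces A's precomputed head->index dict and index chasing by a shrinking pool of
-- unused edges: each step pops the first remaining pool edge whose head equals the current
-- tail (objective: alternative; not faster).
-- Both ports are faithful on Pre_ (where the Python programs return); on raising/diverging
-- inputs, which Pre_ excludes, A's fuel-bounded port returns the list accumulated so far.

-- ===== PORT A =====
-- map.setdefault(r[0], i) over enumerate(ridge)
def buildMapA (ridge : List (List Int)) : PySem.Dict Int Int :=
  (PySem.List.enumerate ridge 0).foldl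
    (fun d p =>
      match PySem.List.pyGet? p.2 0 with
      | some k => d.setdefault k p.1
      | none => d)   -- Python raises IndexError on an empty edge here (outside Pre_)
    PySem.Dict.empty

-- while ridge[i][1] != ridge[0][0]: i = map[ridge[i][1]]; process_ridge.append(ridge[i])
def loopA (ridge : List (List Int)) (map : PySem.Dict Int Int) (start : Int) :
    Nat → Int → List (List Int) → List (List Int)
  | 0, _, acc => acc
  | fuel + 1, i, acc =>
    match PySem.List.pyGet? ridge i with
    | none => acc
    | some ri =>
      match PySem.List.pyGet? ri 1 with
      | none => acc          -- IndexError (outside Pre_)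
      | some t =>
        if t = start then acc
        else
          match map.get? t with
          | none => acc      -- KeyError (outside Pre_)
          | some j =>
            match PySem.List.pyGet? ridge j with
            | none => acc    -- unreachable: map values are valid indices
            | some rj => loopA ridge map start fuel j (acc ++ [rj])

def preprocess_ridge_py (ridge : List (List Int)) : List (List Int) :=
  let map := buildMapA ridge
  match PySem.List.pyGet? ridge 0 with
  | none => []               -- IndexError on empty ridge (outside Pre_)
  | some r0 =>
    match PySem.List.pyGet? r0 0 with
    | none => [r0]           -- IndexError (outside Pre_)
    | some start => loopA ridge map start ridge.length 0 [r0]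

-- ===== PORT B =====
-- termination helper for the pool recursion (cited by name in decreasing_by)
theorem findIdx?_lt_length {α : Type} (p : α → Bool) :
    ∀ (l : List α) (j : Nat), l.findIdx? p = some j → j < l.length := by
  intro l
  induction l with
  | nil => intro j h; simp at h
  | cons a l ih =>
      intro j h
      rw [List.findIdx?_cons] at h
      by_cases ha : p a
      · simp only [ha, if_true] at h; cases h; simp
      · simp only [ha, if_false, Bool.false_eq_true] at h
        cases hf : l.findIdx? p with
        | none => rw [hf] at h; simp at h
        | some j' =>
            rw [hf] at h
            obtain rfl : j' + 1 = j := by simpa using h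
            have := ih j' hf
            simp; omega

-- while out[-1][1] != start: j = first pool index with pool[j][0] == t; out.append(pool.pop(j))
-- (pool[:j] + pool[j+1:] is ported as pool.take j ++ pool.drop (j+1); exact since 0 ≤ j)
def loopB (start : Int) (cur : List Int) (pool : List (List Int)) (acc : List (List Int)) :
    List (List Int) :=
  match PySem.List.pyGet? cur 1 with
  | none => acc              -- IndexError (outside Pre_)
  | some t =>
    if t = start then acc
    else
      match hj : pool.findIdx? (fun r => PySem.List.pyGet? r 0 == some t) with
      | none => acc          -- StopIteration (outside Pre_)
      | some j =>
        loopB start (pool.getD j []) (pool.take j ++ pool.drop (j + 1))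
          (acc ++ [pool.getD j []])
termination_by pool.length
decreasing_by
  have hlt := findIdx?_lt_length _ pool j hj
  simp [List.length_take, List.length_drop]; omega

def preprocess_ridge_py_alt (ridge : List (List Int)) : List (List Int) :=
  match PySem.List.pyGet? ridge 0 with
  | none => []               -- IndexError on empty ridge (outside Pre_)
  | some r0 =>
    match PySem.List.pyGet? r0 0 with
    | none => [r0]           -- IndexError (outside Pre_)
    | some start => loopB start r0 (ridge.drop 1) [r0]

-- ===== PRECONDITION & SPEC =====
-- Helpers for Pre_ only (independent of both ports): the successor of an edge is the
-- first edge whose head equals its tail, and pvChain is the walk from edge 0.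
def pvStep (ridge : List (List Int)) (cur : List Int) : Option (List Int) :=
  cur[1]?.bind (fun t => ridge.find? (fun r => r[0]? == some t))

def pvChain (ridge : List (List Int)) : Nat → Option (List Int)
  | 0 => ridge[0]?
  | k + 1 => (pvChain ridge k).bind (pvStep ridge)

-- the walk halts after k steps: the current edge's tail equals edge 0's head
def pvStops (ridge : List (List Int)) (k : Nat) : Bool :=
  match pvChain ridge k with
  | some cur => cur[1]?.isSome && (cur[1]? == (ridge.headD [])[0]?)
  | none => false

-- Exactly the inputs on which the Python A returns: a nonempty list of nonempty edges
-- (else IndexError while building the dict) on which the first-match walk from edge 0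
-- reaches an edge whose tail is edge 0's head (else KeyError/IndexError inside the
-- loop, or the loop runs forever); a halting walk halts within ridge.length steps.
def Pre_preprocess_ridge_py (ridge : List (List Int)) : Prop :=
  ridge ≠ [] ∧ (∀ r ∈ ridge, r ≠ []) ∧ ∃ k, k < ridge.length ∧ pvStops ridge k = true
instance (ridge : List (List Int)) : Decidable (Pre_preprocess_ridge_py ridge) := by
  unfold Pre_preprocess_ridge_py; infer_instance

def pvWitness_preprocess_ridge_py : List (List Int) := [[1, 2], [2, 3], [3, 1]]

def Spec_preprocess_ridge_py (ridge : List (List Int)) (out : List (List Int)) : Prop := out = preprocess_ridge_py_alt ridge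
instance (ridge : List (List Int)) (out : List (List Int)) : Decidable (Spec_preprocess_ridge_py ridge out) := by unfold Spec_preprocess_ridge_py; infer_instance

-- ===== CLAIM (what is proved, stated in full; the proofs are below) =====
def Claim_equal_preprocess_ridge_py : Prop := ∀ (ridge : List (List Int)), Dom_preprocess_ridge_py ridge → Pre_preprocess_ridge_py ridge → Spec_preprocess_ridge_py ridge (preprocess_ridge_py ridge)

-- ===== LEMMAS AND PROOFS =====

theorem pyGet0 {α : Type} (l : List α) : PySem.List.pyGet? l 0 = l[0]? := by
  have h : (0 : Int) = ((0 : Nat) : Int) := by norm_num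
  rw [h, PySem.List.pyGet?_natCast]

theorem pyGet1 {α : Type} (l : List α) : PySem.List.pyGet? l 1 = l[1]? := by
  have h : (1 : Int) = ((1 : Nat) : Int) := by norm_num
  rw [h, PySem.List.pyGet?_natCast]

-- the first full-list match for a tail (shared reference for both proofs)
def pvNxt (ridge : List (List Int)) (t : Int) : Option (List Int) :=
  ridge.find? (fun r => PySem.List.pyGet? r 0 == some t)

-- the reference run: the list of edges appended by a (fuel-bounded) full-list walk
def runList (ridge : List (List Int)) (start : Int) : Nat → List Int → Option (List (List Int))
  | 0, cur =>
    match PySem.List.pyGet? cur 1 with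
    | none => none
    | some t => if t = start then some [] else none
  | f + 1, cur =>
    match PySem.List.pyGet? cur 1 with
    | none => none
    | some t =>
      if t = start then some []
      else
        match pvNxt ridge t with
        | none => none
        | some r => (runList ridge start f r).map (r :: ·)

-- A's loop rewritten as a full-list rescan (intermediate between the two ports)
def scanLoop (ridge : List (List Int)) (start : Int) :
    Nat → List Int → List (List Int) → List (List Int)
  | 0, _, acc => acc
  | fuel + 1, cur, acc =>
    match PySem.List.pyGet? cur 1 with
    | none => acc
    | some t =>
      if t = start then acc
      else
        match ridge.find? (fun r => PySem.List.pyGet? r 0 == some t) with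
        | none => acc
        | some r => scanLoop ridge start fuel r (acc ++ [r])

theorem buildMapA_aux (v : Int) (l : List (List Int)) :
    ∀ (s : Int) (d : PySem.Dict Int Int),
      ((PySem.List.enumerate l s).foldl
        (fun d p =>
          match PySem.List.pyGet? p.2 0 with
          | some k => d.setdefault k p.1
          | none => d) d).get? v =
      match d.get? v with
      | some j => some j
      | none => (l.findIdx? (fun r => PySem.List.pyGet? r 0 == some v)).map (fun n => (s + n : Int)) := by
  induction l with
  | nil =>
      intro s d
      cases h : d.get? v <;> simp [PySem.List.enumerate, h]
  | cons r l ih =>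
      intro s d
      have step : PySem.List.enumerate (r :: l) s = (s, r) :: PySem.List.enumerate l (s + 1) := rfl
      rw [step, List.foldl_cons]
      cases hr : PySem.List.pyGet? r 0 with
      | none =>
          dsimp only
          rw [ih (s + 1) d]
          cases h : d.get? v with
          | some j => simp
          | none =>
              simp only [List.findIdx?_cons, hr]
              cases l.findIdx? (fun r => PySem.List.pyGet? r 0 == some v) <;>
                (simp; try omega)
      | some k =>
          dsimp only
          by_cases hkv : k = v
          · subst hkv
            rw [ih (s + 1) (d.setdefault k s)]
            simp only [List.findIdx?_cons, hr]
            rw [PySem.Dict.get?_setdefault_self]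
            cases d.get? k <;> simp
          · rw [ih (s + 1) (d.setdefault k s)]
            rw [PySem.Dict.get?_setdefault_of_ne d s (Ne.symm hkv)]
            cases h : d.get? v with
            | some j => simp
            | none =>
                simp only [List.findIdx?_cons, hr]
                have hb : ((some k == some v) : Bool) = false := by simp [hkv]
                rw [hb]
                cases l.findIdx? (fun r => PySem.List.pyGet? r 0 == some v) <;>
                  (simp; try omega)

theorem buildMapA_get (ridge : List (List Int)) (v : Int) :
    (buildMapA ridge).get? v =
      (ridge.findIdx? (fun r => PySem.List.pyGet? r 0 == some v)).map (fun n => (n : Int)) := by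
  unfold buildMapA
  rw [buildMapA_aux v ridge 0 PySem.Dict.empty, PySem.Dict.get?_empty]
  cases hf : ridge.findIdx? (fun r => PySem.List.pyGet? r 0 == some v) <;> simp

theorem find?_of_findIdx? {α : Type} (p : α → Bool) :
    ∀ (l : List α) (j : Nat), l.findIdx? p = some j →
      ∃ r, l[j]? = some r ∧ l.find? p = some r
  | a :: l, j, h => by
      rw [List.findIdx?_cons] at h
      by_cases ha : p a
      · simp only [ha, if_true] at h
        cases h
        exact ⟨a, rfl, by simp [ha]⟩
      · simp only [ha, if_false, Bool.false_eq_true] at h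
        cases hf : l.findIdx? p with
        | none => rw [hf] at h; simp at h
        | some j' =>
            rw [hf] at h
            obtain rfl : j' + 1 = j := by simpa using h
            obtain ⟨r, hr1, hr2⟩ := find?_of_findIdx? p l j' hf
            refine ⟨r, by simpa using hr1, ?_⟩
            rw [List.find?_cons]
            simp [ha, hr2]

theorem loopA_scan (ridge : List (List Int)) (start : Int) :
    ∀ (fuel : Nat) (i : Int) (cur : List Int) (acc : List (List Int)),
      PySem.List.pyGet? ridge i = some cur →
      loopA ridge (buildMapA ridge) start fuel i acc = scanLoop ridge start fuel cur acc
  | 0, i, cur, acc, _ => rfl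
  | fuel + 1, i, cur, acc, hi => by
      rw [loopA, scanLoop, hi]
      dsimp only
      cases ht : PySem.List.pyGet? cur 1 with
      | none => rfl
      | some t =>
          dsimp only
          by_cases hts : t = start
          · simp [hts]
          · simp only [hts, if_false]
            rw [buildMapA_get]
            cases hf : ridge.findIdx? (fun r => PySem.List.pyGet? r 0 == some t) with
            | none =>
                have hfn : ridge.find? (fun r => PySem.List.pyGet? r 0 == some t) = none := by
                  rw [List.find?_eq_none]
                  intro x hx
                  have := List.findIdx?_eq_none_iff.mp hf x hx
                  simp [this]
                rw [hfn]
                rfl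
            | some j =>
                obtain ⟨r, hr1, hr2⟩ := find?_of_findIdx? _ ridge j hf
                rw [hr2]
                have hj : PySem.List.pyGet? ridge ((j : Nat) : Int) = some r := by
                  rw [PySem.List.pyGet?_natCast]; exact hr1
                show (match PySem.List.pyGet? ridge ((j : Nat) : Int) with
                  | none => acc
                  | some rj => loopA ridge (buildMapA ridge) start fuel ((j : Nat) : Int) (acc ++ [rj])) = _
                rw [hj]
                exact loopA_scan ridge start fuel j r (acc ++ [r]) hj

-- scanLoop computes exactly the run list
theorem scanLoop_run (ridge : List (List Int)) (start : Int) :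
    ∀ (f : Nat) (cur : List Int) (acc M : List (List Int)),
      runList ridge start f cur = some M →
      scanLoop ridge start f cur acc = acc ++ M := by
  intro f
  induction f with
  | zero =>
      intro cur acc M h
      rw [runList] at h
      cases ht : PySem.List.pyGet? cur 1 with
      | none => rw [ht] at h; simp at h
      | some t =>
          rw [ht] at h
          by_cases hts : t = start
          · simp only [hts, if_true] at h
            cases h; simp [scanLoop]
          · simp [hts] at h
  | succ f ih =>
      intro cur acc M h
      rw [runList] at h
      rw [scanLoop]
      cases ht : PySem.List.pyGet? cur 1 with
      | none => rw [ht] at h; simp at h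
      | some t =>
          rw [ht] at h
          dsimp only
          by_cases hts : t = start
          · simp only [hts, if_true] at h ⊢
            cases h; simp
          · simp only [hts, if_false] at h ⊢
            cases hn : pvNxt ridge t with
            | none => rw [hn] at h; dsimp only at h; simp at h
            | some r =>
                rw [hn] at h; dsimp only at h
                cases hM' : runList ridge start f r with
                | none => rw [hM'] at h; simp at h
                | some M' =>
                    rw [hM'] at h
                    simp only [Option.map_some] at h
                    cases h
                    have hnx : ridge.find? (fun r => PySem.List.pyGet? r 0 == some t) = some r := hn
                    rw [hnx]
                    dsimp only
                    rw [ih r (acc ++ [r]) M' hM']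
                    simp

-- basic facts about the run
theorem runStart (ridge : List (List Int)) (start : Int) (f : Nat) (cur : List Int)
    (h : PySem.List.pyGet? cur 1 = some start) :
    runList ridge start f cur = some [] := by
  cases f <;> (rw [runList, h]; simp)

theorem runCons (ridge : List (List Int)) (start : Int) :
    ∀ (f : Nat) (cur x : List Int) (L : List (List Int)),
      runList ridge start f cur = some (x :: L) →
      ∃ (f' : Nat) (t : Int), f = f' + 1 ∧ PySem.List.pyGet? cur 1 = some t ∧ t ≠ start ∧
        pvNxt ridge t = some x ∧ runList ridge start f' x = some L := by
  intro f cur x L h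
  cases f with
  | zero =>
      rw [runList] at h
      cases ht : PySem.List.pyGet? cur 1 with
      | none => rw [ht] at h; simp at h
      | some t =>
          rw [ht] at h
          by_cases hts : t = start
          · simp [hts] at h
          · simp [hts] at h
  | succ f =>
      rw [runList] at h
      cases ht : PySem.List.pyGet? cur 1 with
      | none => rw [ht] at h; simp at h
      | some t =>
          rw [ht] at h
          by_cases hts : t = start
          · simp [hts] at h
          · simp only [hts, if_false] at h
            cases hn : pvNxt ridge t with
            | none => rw [hn] at h; dsimp only at h; simp at h
            | some r =>
                rw [hn] at h; dsimp only at h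
                cases hL : runList ridge start f r with
                | none => rw [hL] at h; simp at h
                | some L' =>
                    rw [hL] at h
                    simp only [Option.map_some, Option.some.injEq, List.cons.injEq] at h
                    obtain ⟨rfl, rfl⟩ := h
                    exact ⟨f, t, rfl, rfl, hts, hn, hL⟩

theorem runNil (ridge : List (List Int)) (start : Int) (f : Nat) (cur : List Int)
    (h : runList ridge start f cur = some []) :
    PySem.List.pyGet? cur 1 = some start := by
  cases f with
  | zero =>
      rw [runList] at h
      cases ht : PySem.List.pyGet? cur 1 with
      | none => rw [ht] at h; simp at h
      | some t =>
          rw [ht] at h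
          by_cases hts : t = start
          · simp [hts]
          · simp [hts] at h
  | succ f =>
      rw [runList] at h
      cases ht : PySem.List.pyGet? cur 1 with
      | none => rw [ht] at h; simp at h
      | some t =>
          rw [ht] at h
          by_cases hts : t = start
          · simp [hts]
          · simp only [hts, if_false] at h
            cases hn : pvNxt ridge t with
            | none => rw [hn] at h; dsimp only at h; simp at h
            | some r =>
                rw [hn] at h; dsimp only at h
                cases hL : runList ridge start f r with
                | none => rw [hL] at h; simp at h
                | some L' => rw [hL] at h; simp at h

-- the run value does not depend on the fuel (only success does)
theorem runDet (ridge : List (List Int)) (start : Int) :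
    ∀ (f1 f2 : Nat) (cur : List Int) (M1 M2 : List (List Int)),
      runList ridge start f1 cur = some M1 → runList ridge start f2 cur = some M2 → M1 = M2 := by
  intro f1
  induction f1 with
  | zero =>
      intro f2 cur M1 M2 h1 h2
      cases M1 with
      | nil =>
          have := runNil ridge start 0 cur h1
          rw [runStart ridge start f2 cur this] at h2
          cases h2; rfl
      | cons x L =>
          obtain ⟨f', t, hf, _⟩ := runCons ridge start 0 cur x L h1
          simp at hf
  | succ f1 ih =>
      intro f2 cur M1 M2 h1 h2
      cases M1 with
      | nil =>
          have := runNil ridge start (f1 + 1) cur h1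
          rw [runStart ridge start f2 cur this] at h2
          cases h2; rfl
      | cons x L1 =>
          obtain ⟨f1', t, hf1, ht, hts, hn, hL1⟩ := runCons ridge start (f1 + 1) cur x L1 h1
          obtain rfl : f1' = f1 := by omega
          cases M2 with
          | nil =>
              have := runNil ridge start f2 cur h2
              rw [this] at ht; cases ht; exact absurd rfl hts
          | cons y L2 =>
              obtain ⟨f2', t2, hf2, ht2, _, hn2, hL2⟩ := runCons ridge start f2 cur y L2 h2
              rw [ht] at ht2; cases ht2
              rw [hn] at hn2; cases hn2
              rw [ih f2' x L1 L2 hL1 hL2]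

-- every suffix of a run is a run
theorem runSuffix (ridge : List (List Int)) (start : Int) :
    ∀ (A : List (List Int)) (f : Nat) (cur r : List Int) (B : List (List Int)),
      runList ridge start f cur = some (A ++ r :: B) →
      ∃ f', runList ridge start f' r = some B := by
  intro A
  induction A with
  | nil =>
      intro f cur r B h
      obtain ⟨f', t, _, _, _, _, hL⟩ := runCons ridge start f cur r B h
      exact ⟨f', hL⟩
  | cons a A ih =>
      intro f cur r B h
      obtain ⟨f', t, _, _, _, _, hL⟩ := runCons ridge start f cur a (A ++ r :: B) h
      exact ih f' a r B hL

-- every run element is the first full-list match of its own head, which is not start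
theorem runElems (ridge : List (List Int)) (start : Int) :
    ∀ (f : Nat) (cur : List Int) (M : List (List Int)),
      runList ridge start f cur = some M →
      ∀ x ∈ M, ∃ tx, PySem.List.pyGet? x 0 = some tx ∧ tx ≠ start ∧ pvNxt ridge tx = some x := by
  intro f
  induction f with
  | zero =>
      intro cur M h x hx
      cases M with
      | nil => simp at hx
      | cons y L => obtain ⟨f', t, hf, _⟩ := runCons ridge start 0 cur y L h; simp at hf
  | succ f ih =>
      intro cur M h x hx
      cases M with
      | nil => simp at hx
      | cons y L =>
          obtain ⟨f', t, hf, ht, hts, hn, hL⟩ := runCons ridge start (f + 1) cur y L h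
          obtain rfl : f' = f := by omega
          rcases List.mem_cons.mp hx with rfl | hx'
          · refine ⟨t, ?_, hts, hn⟩
            have := List.find?_some hn
            simpa using this
          · exact ih y L hL x hx'

-- along a (terminating) run all queried heads are distinct
theorem runNodup (ridge : List (List Int)) (start : Int) :
    ∀ (f : Nat) (cur : List Int) (M : List (List Int)),
      runList ridge start f cur = some M →
      (M.map (fun r => PySem.List.pyGet? r 0)).Nodup := by
  intro f
  induction f with
  | zero =>
      intro cur M h
      cases M with
      | nil => simp
      | cons y L => obtain ⟨f', t, hf, _⟩ := runCons ridge start 0 cur y L h; simp at hf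
  | succ f ih =>
      intro cur M h
      cases M with
      | nil => simp
      | cons y L =>
          obtain ⟨f', t, hf, ht, hts, hn, hL⟩ := runCons ridge start (f + 1) cur y L h
          obtain rfl : f' = f := by omega
          have hy : PySem.List.pyGet? y 0 = some t := by
            have := List.find?_some hn; simpa using this
          simp only [List.map_cons, List.nodup_cons]
          refine ⟨?_, ih y L hL⟩
          intro hmem
          obtain ⟨x, hxL, hx0⟩ := List.mem_map.mp hmem
          obtain ⟨tx, hx0', _, hnx⟩ := runElems ridge start f' y L hL x hxL
          rw [hy] at hx0
          rw [hx0'] at hx0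
          cases hx0
          rw [hn] at hnx; cases hnx
          obtain ⟨A, B, rfl⟩ := List.append_of_mem hxL
          obtain ⟨f2, hB⟩ := runSuffix ridge start A f' y y B hL
          have := runDet ridge start f' f2 y (A ++ y :: B) B hL hB
          have hlen := congrArg List.length this
          simp only [List.length_append, List.length_cons] at hlen
          omega

-- erasing a non-matching element preserves find?
theorem erase_find {α : Type} :
    ∀ (pool : List α) (j : Nat) (x : α) (q : α → Bool),
      pool[j]? = some x → q x = false →
      (pool.take j ++ pool.drop (j + 1)).find? q = pool.find? q := by
  intro pool
  induction pool with
  | nil => intro j x q h; simp at h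
  | cons a pool ih =>
      intro j x q h hq
      cases j with
      | zero =>
          simp at h
          subst h
          simp [hq]
      | succ j =>
          simp only [List.getElem?_cons_succ] at h
          simp only [List.take_succ_cons, List.drop_succ_cons, List.cons_append, List.find?_cons]
          cases hqa : q a
          · exact ih j x q h hq
          · rfl

-- find? = none when findIdx? = none
theorem find?_none_of_findIdx?_none {α : Type} (l : List α) (q : α → Bool)
    (h : l.findIdx? q = none) : l.find? q = none := by
  rw [List.find?_eq_none]
  intro x hx
  have := List.findIdx?_eq_none_iff.mp h x hx
  simp [this]

-- B's pool loop computes the run list, given that the pool agrees with the full list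
-- on every head the run still queries and those heads are distinct
theorem loopB_run (ridge : List (List Int)) (start : Int) :
    ∀ (f : Nat) (cur : List Int) (pool acc M : List (List Int)),
      runList ridge start f cur = some M →
      (∀ t, some t ∈ M.map (fun r => PySem.List.pyGet? r 0) →
        pool.find? (fun r => PySem.List.pyGet? r 0 == some t) = pvNxt ridge t) →
      (M.map (fun r => PySem.List.pyGet? r 0)).Nodup →
      loopB start cur pool acc = acc ++ M := by
  intro f
  induction f with
  | zero =>
      intro cur pool acc M h _ _
      cases M with
      | nil =>
          have ht := runNil ridge start 0 cur h
          rw [loopB, ht]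
          simp
      | cons y L => obtain ⟨f', t, hf, _⟩ := runCons ridge start 0 cur y L h; simp at hf
  | succ f ih =>
      intro cur pool acc M h hpool hnodup
      cases M with
      | nil =>
          have ht := runNil ridge start (f + 1) cur h
          rw [loopB, ht]
          simp
      | cons y L =>
          obtain ⟨f', t, hf, ht, hts, hn, hL⟩ := runCons ridge start (f + 1) cur y L h
          obtain rfl : f' = f := by omega
          have hy : PySem.List.pyGet? y 0 = some t := by
            have := List.find?_some hn; simpa using this
          have hpf : pool.find? (fun r => PySem.List.pyGet? r 0 == some t) = some y := by
            rw [hpool t (by simp [hy]), hn]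
          rw [loopB, ht]
          simp only [hts, if_false]
          cases hj : pool.findIdx? (fun r => PySem.List.pyGet? r 0 == some t) with
          | none =>
              rw [find?_none_of_findIdx?_none pool _ hj] at hpf
              simp at hpf
          | some j =>
              dsimp only
              obtain ⟨r, hr1, hr2⟩ := find?_of_findIdx? _ pool j hj
              rw [hpf] at hr2
              cases hr2
              have hget : pool.getD j ([] : List Int) = y := by
                rw [List.getD_eq_getElem?_getD, hr1]; rfl
              rw [hget]
              have hLrun := ih y (pool.take j ++ pool.drop (j + 1)) (acc ++ [y]) L hL ?_ ?_
              · rw [hLrun]; simp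
              · intro t' ht'
                have htt' : t' ≠ t := by
                  intro hEq
                  simp only [List.map_cons, List.nodup_cons] at hnodup
                  exact hnodup.1 (by rw [hy, ← hEq]; exact ht')
                have hqy : ((fun r => PySem.List.pyGet? r 0 == some t') y) = false := by
                  simp only [hy, beq_eq_false_iff_ne, ne_eq, Option.some.injEq]
                  exact fun hEq => htt' hEq.symm
                rw [erase_find pool j y _ hr1 hqy]
                exact hpool t' (by simp only [List.map_cons]; exact List.mem_cons_of_mem _ ht')
              · simp only [List.map_cons, List.nodup_cons] at hnodup
                exact hnodup.2

-- bridging Pre_'s walk to the run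
def chainFrom (ridge : List (List Int)) : Nat → List Int → Option (List Int)
  | 0, cur => some cur
  | k + 1, cur => (pvStep ridge cur).bind (chainFrom ridge k)

theorem chainFrom_shift (ridge : List (List Int)) :
    ∀ (k : Nat) (cur : List Int),
      chainFrom ridge (k + 1) cur = (chainFrom ridge k cur).bind (pvStep ridge) := by
  intro k
  induction k with
  | zero => intro cur; simp [chainFrom]
  | succ k ih =>
      intro cur
      show (pvStep ridge cur).bind (chainFrom ridge (k + 1)) = _
      cases hs : pvStep ridge cur with
      | none => simp [chainFrom, hs]
      | some r =>
          simp only [Option.bind_some]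
          rw [ih r]
          simp [chainFrom, hs]

theorem pvChain_eq (ridge : List (List Int)) :
    ∀ (k : Nat), pvChain ridge k = (ridge[0]?).bind (fun c => chainFrom ridge k c) := by
  intro k
  induction k with
  | zero => cases h : ridge[0]? <;> simp [pvChain, chainFrom, h]
  | succ k ih =>
      show (pvChain ridge k).bind (pvStep ridge) = _
      rw [ih]
      cases h : ridge[0]? with
      | none => simp
      | some c =>
          simp only [Option.bind_some]
          rw [chainFrom_shift]

-- predicates in pvStep and pvNxt agree
theorem pred_eq (t : Int) :
    (fun r : List Int => r[0]? == some t) = (fun r => PySem.List.pyGet? r 0 == some t) := by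
  funext r
  rw [pyGet0]

-- a stopping walk yields a successful run for any sufficient fuel
theorem stops_to_run (ridge : List (List Int)) (start : Int) :
    ∀ (k : Nat) (f : Nat) (cur c : List Int), k ≤ f →
      chainFrom ridge k cur = some c → getElem? c 1 = some start →
      ∃ M, runList ridge start f cur = some M := by
  intro k
  induction k with
  | zero =>
      intro f cur c _ hc hstop
      cases hc
      refine ⟨[], runStart ridge start f cur ?_⟩
      rw [pyGet1]; exact hstop
  | succ k ih =>
      intro f cur c hkf hc hstop
      rw [show k + 1 = k + 1 from rfl] at hc
      unfold chainFrom at hc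
      cases hs : pvStep ridge cur with
      | none => rw [hs] at hc; simp at hc
      | some r =>
          rw [hs] at hc
          simp only [Option.bind_some] at hc
          unfold pvStep at hs
          cases ht : cur[1]? with
          | none => rw [ht] at hs; simp at hs
          | some t =>
              rw [ht] at hs
              simp only [Option.bind_some] at hs
              by_cases hts : t = start
              · rw [hts] at ht
                exact ⟨[], runStart ridge start f cur (by rw [pyGet1]; exact ht)⟩
              · obtain ⟨f', rfl⟩ : ∃ f', f = f' + 1 := ⟨f - 1, by omega⟩
                obtain ⟨M', hM'⟩ := ih f' r c (by omega) hc hstop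
                refine ⟨r :: M', ?_⟩
                rw [runList]
                rw [pyGet1, ht]
                simp only [hts, if_false]
                have hnx : pvNxt ridge t = some r := by
                  unfold pvNxt
                  rw [← pred_eq]
                  exact hs
                rw [hnx]
                dsimp only
                rw [hM']
                rfl

-- ===== VERDICT (by name: the statement is the Claim_ definition above) =====
theorem preprocess_ridge_py_spec : Claim_equal_preprocess_ridge_py := by
  intro ridge _ hpre
  obtain ⟨hne, hedges, k, hk, hstops⟩ := hpre
  obtain ⟨r0, rest, rfl⟩ : ∃ a l, ridge = a :: l := by
    cases ridge with
    | nil => exact absurd rfl hne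
    | cons a l => exact ⟨a, l, rfl⟩
  obtain ⟨s, r0', rfl⟩ : ∃ a l, r0 = a :: l := by
    cases r0 with
    | nil => exact absurd rfl (hedges [] (by simp))
    | cons a l => exact ⟨a, l, rfl⟩
  -- decode pvStops
  unfold pvStops at hstops
  cases hch : pvChain ((s :: r0') :: rest) k with
  | none => rw [hch] at hstops; simp at hstops
  | some c =>
      rw [hch] at hstops
      dsimp only at hstops
      have hstop : getElem? c 1 = some s := by
        cases hc1 : getElem? c 1 with
        | none => rw [hc1] at hstops; simp at hstops
        | some v =>
            rw [hc1] at hstops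
            simp only [Option.isSome_some, Bool.true_and, beq_iff_eq] at hstops
            simpa using hstops
      rw [pvChain_eq] at hch
      simp only [List.getElem?_cons_zero, Option.bind_some] at hch
      -- the run exists with fuel = length
      obtain ⟨M, hrun⟩ := stops_to_run ((s :: r0') :: rest) s k ((s :: r0') :: rest).length
        (s :: r0') c (by omega) hch hstop
      -- shared facts
      have h0 : PySem.List.pyGet? ((s :: r0') :: rest) 0 = some (s :: r0') := by
        rw [pyGet0]; rfl
      have hs0 : PySem.List.pyGet? (s :: r0') 0 = some s := by
        rw [pyGet0]; rfl
      unfold Spec_preprocess_ridge_py preprocess_ridge_py preprocess_ridge_py_alt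
      rw [h0]
      simp only
      rw [hs0]
      simp only
      -- A side
      rw [loopA_scan ((s :: r0') :: rest) s ((s :: r0') :: rest).length 0 (s :: r0') [s :: r0'] h0]
      rw [scanLoop_run ((s :: r0') :: rest) s ((s :: r0') :: rest).length (s :: r0') [s :: r0'] M hrun]
      -- B side
      have hfind : ∀ t, some t ∈ M.map (fun r => PySem.List.pyGet? r 0) →
          rest.find? (fun r => PySem.List.pyGet? r 0 == some t) = pvNxt ((s :: r0') :: rest) t := by
        intro t htM
        obtain ⟨x, hxM, hx0⟩ := List.mem_map.mp htM
        obtain ⟨tx, hx0', htx, _⟩ := runElems ((s :: r0') :: rest) s _ _ M hrun x hxM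
        rw [hx0'] at hx0
        cases hx0
        unfold pvNxt
        rw [List.find?_cons]
        have hfalse : (PySem.List.pyGet? (s :: r0') 0 == some t) = false := by
          rw [hs0]
          simp [Ne.symm htx]
        rw [hfalse]
      have hB := loopB_run ((s :: r0') :: rest) s ((s :: r0') :: rest).length (s :: r0') rest
        [s :: r0'] M hrun hfind (runNodup ((s :: r0') :: rest) s _ _ M hrun)
      rw [show ((s :: r0') :: rest).drop 1 = rest from rfl, hB]
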